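-- pv_equiv track=rewrite | github.com/NovelleP/AdventOfCode2021 | day5/day5_2.py | expand_point
-- ===== SOURCE A (Python) =====
-- def expand_point(p1: tuple[int, int], p2: tuple[int, int]) -> list[tuple[int, int]]:
--     x1, y1 = p1
--     x2, y2 = p2
--     if x1 == x2:
--         return [(x1, y) for y in range(min(y1, y2), max(y1, y2) + 1)]
--     elif y1 == y2:
--         return [(x, y1) for x in range(min(x1, x2), max(x1, x2) + 1)]
--     elif abs(x1 - x2) == abs(y1 - y2):
--         x_components = range(x1, x2 + (1 if x1 < x2 else -1), 1 if x1 < x2 else -1)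
--         y_components = range(y1, y2 + (1 if y1 < y2 else -1), 1 if y1 < y2 else -1)
--         return list(zip(x_components, y_components))
-- ===== SOURCE B (Python) =====
-- def expand_point(p1: tuple[int, int], p2: tuple[int, int]) -> list[tuple[int, int]]:
--     x1, y1 = p1
--     x2, y2 = p2
--     if x1 == x2 or y1 == y2:
--         # axis-aligned: A emits ascending, so walk from the lexicographically
--         # smaller endpoint (tuple order) to the larger one
--         return _walk(min(p1, p2), max(p1, p2))
--     if abs(x1 - x2) != abs(y1 - y2):
--         return None
--     return _walk(p1, p2)
--
--
-- def _walk(p, q):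
--     # step toward q one unit-sign move at a time until it is reached
--     pts = [p]
--     while p != q:
--         p = (p[0] + (q[0] > p[0]) - (q[0] < p[0]),
--              p[1] + (q[1] > p[1]) - (q[1] < p[1]))
--         pts.append(p)
--     return pts
-- ===== Notes on version B (the rewrite author's own statement) =====
-- stated objective: alternative
-- what changed: B replaces A's three branch-specific range/zip list constructions with one unified endpoint-driven walker: it normalises axis-aligned endpoints via lexicographic tuple min/max and then repeatedly steps by the unit sign vector toward the target until reaching it, with no element count or range precomputed (and an explicit None for non-matching segments).
import Mathlib
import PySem

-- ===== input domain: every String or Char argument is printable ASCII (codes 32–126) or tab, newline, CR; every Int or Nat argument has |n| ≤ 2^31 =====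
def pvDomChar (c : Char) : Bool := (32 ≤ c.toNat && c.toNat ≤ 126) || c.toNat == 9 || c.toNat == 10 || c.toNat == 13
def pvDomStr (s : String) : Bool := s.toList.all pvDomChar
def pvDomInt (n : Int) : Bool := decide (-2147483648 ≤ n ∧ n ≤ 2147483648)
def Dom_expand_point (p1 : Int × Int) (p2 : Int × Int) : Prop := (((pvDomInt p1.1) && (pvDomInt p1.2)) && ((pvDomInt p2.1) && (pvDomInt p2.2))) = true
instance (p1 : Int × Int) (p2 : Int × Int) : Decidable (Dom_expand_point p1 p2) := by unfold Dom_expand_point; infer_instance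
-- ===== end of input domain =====

-- B replaces A's three range/zip constructions with one unified step-toward-target walker over
-- lexicographically normalised endpoints; objective: alternative (same cost, different algorithm shape).


-- ===== PORT A =====
def expand_point (p1 : Int × Int) (p2 : Int × Int) : Option (List (Int × Int)) :=
  let x1 := p1.1; let y1 := p1.2
  let x2 := p2.1; let y2 := p2.2
  if x1 = x2 then
    some ((PySem.List.pyRange (min y1 y2) (max y1 y2 + 1) 1).map (fun y => (x1, y)))
  else if y1 = y2 then
    some ((PySem.List.pyRange (min x1 x2) (max x1 x2 + 1) 1).map (fun x => (x, y1)))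
  else if |x1 - x2| = |y1 - y2| then
    let xs := PySem.List.pyRange x1 (x2 + (if x1 < x2 then 1 else -1)) (if x1 < x2 then 1 else -1)
    let ys := PySem.List.pyRange y1 (y2 + (if y1 < y2 then 1 else -1)) (if y1 < y2 then 1 else -1)
    some (List.zip xs ys)
  else
    none  -- Python's implicit `return None` fallthrough

-- ===== PORT B =====
-- Python tuple comparison (lexicographic), as used by min(p1, p2) / max(p1, p2) on pairs
def pvLePair (p q : Int × Int) : Bool := p.1 < q.1 || (p.1 == q.1 && p.2 ≤ q.2)
def pvLtPair (p q : Int × Int) : Bool := p.1 < q.1 || (p.1 == q.1 && p.2 < q.2)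
def pvMinPair (p q : Int × Int) : Int × Int := if pvLePair p q then p else q  -- min(p,q): p on tie
def pvMaxPair (p q : Int × Int) : Int × Int := if pvLtPair p q then q else p  -- max(p,q): p on tie

-- the while-loop of Source B's _walk: step by the unit sign vector toward q until it is reached.
-- The fuel argument only makes the recursion structural; pvWalk passes enough for the loop to
-- finish exactly as in Python (when fuel is 0 the points already coincide).
def pvWalkGo : Nat -> (Int × Int) -> (Int × Int) -> List (Int × Int)
  | 0, p, _ => [p]
  | fuel + 1, p, q =>
    if p = q then [p]
    else
      p :: pvWalkGo fuel
        (p.1 + ((if p.1 < q.1 then (1 : Int) else 0) - (if q.1 < p.1 then (1 : Int) else 0)),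
         p.2 + ((if p.2 < q.2 then (1 : Int) else 0) - (if q.2 < p.2 then (1 : Int) else 0))) q

def pvWalk (p q : Int × Int) : List (Int × Int) :=
  pvWalkGo ((q.1 - p.1).natAbs + (q.2 - p.2).natAbs) p q

def expand_point_alt (p1 : Int × Int) (p2 : Int × Int) : Option (List (Int × Int)) :=
  let x1 := p1.1; let y1 := p1.2
  let x2 := p2.1; let y2 := p2.2
  if x1 = x2 ∨ y1 = y2 then
    some (pvWalk (pvMinPair p1 p2) (pvMaxPair p1 p2))
  else if |x1 - x2| ≠ |y1 - y2| then
    none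
  else
    some (pvWalk p1 p2)

-- ===== PRECONDITION & SPEC =====
def Spec_expand_point (p1 : Int × Int) (p2 : Int × Int) (out : Option (List (Int × Int))) : Prop := out = expand_point_alt p1 p2
instance (p1 : Int × Int) (p2 : Int × Int) (out : Option (List (Int × Int))) : Decidable (Spec_expand_point p1 p2 out) := by unfold Spec_expand_point; infer_instance

-- ===== CLAIM =====
def Claim_equal_expand_point : Prop := ∀ (p1 : Int × Int) (p2 : Int × Int), Dom_expand_point p1 p2 → Spec_expand_point p1 p2 (expand_point p1 p2)

-- ===== LEMMAS AND PROOFS =====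

theorem map_range_congr {α : Type} (f g : Nat → α) (m n : Nat) (hmn : m = n)
    (hfg : ∀ k, f k = g k) : (List.range m).map f = (List.range n).map g := by
  subst hmn
  exact List.map_congr_left (fun k _ => hfg k)

-- walking n unit steps of a fixed sign vector (sx, sy) visits exactly the n+1 lattice points
theorem pvWalkGo_steps (sx sy : Int) (hsx : sx = 1 ∨ sx = -1 ∨ sx = 0)
    (hsy : sy = 1 ∨ sy = -1 ∨ sy = 0) (hne : ¬(sx = 0 ∧ sy = 0)) :
    ∀ (fuel n : Nat), n ≤ fuel → ∀ (x y : Int),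
      pvWalkGo fuel (x, y) (x + (n : Int) * sx, y + (n : Int) * sy) =
        (List.range (n + 1)).map (fun k : Nat => (x + (k : Int) * sx, y + (k : Int) * sy)) := by
  intro fuel
  induction fuel with
  | zero =>
    intro n hn x y
    interval_cases n
    simp [pvWalkGo]
  | succ fuel ih =>
    intro n hn x y
    match n with
    | 0 => simp [pvWalkGo]
    | m + 1 =>
      have hne' : ((x, y) : Int × Int) ≠ (x + ((m : Int) + 1) * sx, y + ((m : Int) + 1) * sy) := by
        rcases hsx with h | h | h <;> rcases hsy with h' | h' | h' <;> subst h <;> subst h' <;>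
          simp_all [Prod.ext_iff] <;> omega
      have hdx : ((if x < x + ((m : Int) + 1) * sx then (1 : Int) else 0) -
          (if x + ((m : Int) + 1) * sx < x then (1 : Int) else 0)) = sx := by
        rcases hsx with h | h | h <;> subst h <;> split_ifs <;> omega
      have hdy : ((if y < y + ((m : Int) + 1) * sy then (1 : Int) else 0) -
          (if y + ((m : Int) + 1) * sy < y then (1 : Int) else 0)) = sy := by
        rcases hsy with h | h | h <;> subst h <;> split_ifs <;> omega
      rw [pvWalkGo]
      push_cast
      rw [if_neg hne']
      rw [hdx, hdy,
          show x + ((m : Int) + 1) * sx = (x + sx) + (m : Int) * sx from by ring,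
          show y + ((m : Int) + 1) * sy = (y + sy) + (m : Int) * sy from by ring,
          ih m (by omega) (x + sx) (y + sy)]
      conv_rhs => rw [List.range_succ_eq_map, List.map_cons, List.map_map]
      refine congrArg₂ List.cons ?_ (List.map_congr_left fun k _ => ?_)
      · rw [Prod.mk.injEq]; constructor <;> push_cast <;> ring
      · simp only [Function.comp, Nat.succ_eq_add_one, Prod.mk.injEq]
        constructor <;> push_cast <;> ring

theorem pvWalk_steps (sx sy : Int) (hsx : sx = 1 ∨ sx = -1 ∨ sx = 0)
    (hsy : sy = 1 ∨ sy = -1 ∨ sy = 0) (hne : ¬(sx = 0 ∧ sy = 0)) :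
    ∀ (n : Nat) (x y : Int),
      pvWalk (x, y) (x + (n : Int) * sx, y + (n : Int) * sy) =
        (List.range (n + 1)).map (fun k : Nat => (x + (k : Int) * sx, y + (k : Int) * sy)) := by
  intro n x y
  unfold pvWalk
  refine pvWalkGo_steps sx sy hsx hsy hne _ n ?_ x y
  rcases hsx with h | h | h <;> rcases hsy with h' | h' | h' <;> subst h <;> subst h' <;>
    simp_all

theorem pvWalk_vert (x m M : Int) (h : m ≤ M) :
    pvWalk (x, m) (x, M) = (List.range (M + 1 - m).toNat).map (fun k : Nat => ((x : Int), m + (k : Int))) := by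
  have h2 : ((x, M) : Int × Int) = (x + (((M - m).toNat : Nat) : Int) * 0, m + (((M - m).toNat : Nat) : Int) * 1) := by
    rw [Prod.mk.injEq]; constructor <;> omega
  rw [h2, pvWalk_steps 0 1 (by right; right; rfl) (by left; rfl) (by simp)]
  refine map_range_congr _ _ _ _ ?_ (fun k => ?_)
  · omega
  · rw [Prod.mk.injEq]; constructor <;> ring

theorem pvWalk_horiz (y a b : Int) (h : a ≤ b) :
    pvWalk (a, y) (b, y) = (List.range (b + 1 - a).toNat).map (fun k : Nat => (a + (k : Int), (y : Int))) := by
  have h2 : ((b, y) : Int × Int) = (a + (((b - a).toNat : Nat) : Int) * 1, y + (((b - a).toNat : Nat) : Int) * 0) := by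
    rw [Prod.mk.injEq]; constructor <;> omega
  rw [h2, pvWalk_steps 1 0 (by left; rfl) (by right; right; rfl) (by simp)]
  refine map_range_congr _ _ _ _ ?_ (fun k => ?_)
  · omega
  · rw [Prod.mk.injEq]; constructor <;> ring

theorem pvWalk_diag (x1 y1 x2 y2 : Int) (hd : |x1 - x2| = |y1 - y2|) :
    pvWalk (x1, y1) (x2, y2) =
      (List.range ((x1 - x2).natAbs + 1)).map
        (fun k : Nat => (x1 + (k : Int) * (if x1 < x2 then 1 else -1),
                   y1 + (k : Int) * (if y1 < y2 then 1 else -1))) := by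
  have hd' : (x1 - x2).natAbs = (y1 - y2).natAbs := by
    have := hd
    rw [Int.abs_eq_natAbs, Int.abs_eq_natAbs] at this
    exact_mod_cast this
  have h2 : ((x2, y2) : Int × Int) =
      (x1 + (((x1 - x2).natAbs : Nat) : Int) * (if x1 < x2 then 1 else -1),
       y1 + (((x1 - x2).natAbs : Nat) : Int) * (if y1 < y2 then 1 else -1)) := by
    rw [Prod.mk.injEq]; constructor <;> split_ifs <;> omega
  rw [h2, pvWalk_steps _ _ (by split_ifs <;> simp) (by split_ifs <;> simp) (by split_ifs <;> simp)]

-- ===== VERDICT =====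
theorem expand_point_spec : Claim_equal_expand_point := by
  rintro ⟨x1, y1⟩ ⟨x2, y2⟩ _
  unfold Spec_expand_point expand_point expand_point_alt
  simp only
  by_cases hx : x1 = x2
  · subst hx
    rw [if_pos rfl, if_pos (Or.inl rfl)]
    by_cases hy : y1 ≤ y2
    · have hmin : pvMinPair (x1, y1) (x1, y2) = (x1, y1) := by simp [pvMinPair, pvLePair, hy]
      have hmax : pvMaxPair (x1, y1) (x1, y2) = (x1, y2) := by
        unfold pvMaxPair pvLtPair
        by_cases h : y1 < y2
        · simp [h]
        · simp only [lt_irrefl, beq_self_eq_true, Bool.true_and, h,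
            Bool.or_false, decide_false]
          have : y1 = y2 := by omega
          rw [this]
          simp
      rw [hmin, hmax, pvWalk_vert x1 y1 y2 hy, min_eq_left hy, max_eq_right hy,
          PySem.List.pyRange_one, List.map_map]
      refine congrArg some (map_range_congr _ _ _ _ rfl (fun k => rfl))
    · have hy' : y2 ≤ y1 := by omega
      have hmin : pvMinPair (x1, y1) (x1, y2) = (x1, y2) := by simp [pvMinPair, pvLePair, hy]
      have hmax : pvMaxPair (x1, y1) (x1, y2) = (x1, y1) := by
        simp [pvMaxPair, pvLtPair, show ¬(y1 < y2) from by omega]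
      rw [hmin, hmax, pvWalk_vert x1 y2 y1 hy', min_eq_right hy', max_eq_left hy',
          PySem.List.pyRange_one, List.map_map]
      refine congrArg some (map_range_congr _ _ _ _ rfl (fun k => rfl))
  · rw [if_neg hx]
    by_cases hy : y1 = y2
    · subst hy
      rw [if_pos rfl, if_pos (Or.inr rfl)]
      by_cases hxx : x1 < x2
      · have hmin : pvMinPair (x1, y1) (x2, y1) = (x1, y1) := by simp [pvMinPair, pvLePair, hxx]
        have hmax : pvMaxPair (x1, y1) (x2, y1) = (x2, y1) := by simp [pvMaxPair, pvLtPair, hxx]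
        rw [hmin, hmax, pvWalk_horiz y1 x1 x2 (le_of_lt hxx), min_eq_left (le_of_lt hxx),
            max_eq_right (le_of_lt hxx), PySem.List.pyRange_one, List.map_map]
        refine congrArg some (map_range_congr _ _ _ _ rfl (fun k => rfl))
      · have hxx' : x2 ≤ x1 := by omega
        have hmin : pvMinPair (x1, y1) (x2, y1) = (x2, y1) := by
          simp [pvMinPair, pvLePair, hxx, hx]
        have hmax : pvMaxPair (x1, y1) (x2, y1) = (x1, y1) := by
          simp [pvMaxPair, pvLtPair, hxx]
        rw [hmin, hmax, pvWalk_horiz y1 x2 x1 hxx', min_eq_right hxx', max_eq_left hxx',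
            PySem.List.pyRange_one, List.map_map]
        refine congrArg some (map_range_congr _ _ _ _ rfl (fun k => rfl))
    · rw [if_neg hy, if_neg (show ¬(x1 = x2 ∨ y1 = y2) from fun h => h.elim hx hy)]
      by_cases hd : |x1 - x2| = |y1 - y2|
      · rw [if_pos hd, if_neg (not_not_intro hd), pvWalk_diag x1 y1 x2 y2 hd]
        have hd' : (x1 - x2).natAbs = (y1 - y2).natAbs := by
          have := hd
          rw [Int.abs_eq_natAbs, Int.abs_eq_natAbs] at this
          exact_mod_cast this
        by_cases hlx : x1 < x2 <;> by_cases hly : y1 < y2 <;>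
          simp only [hlx, hly, if_true, if_false] <;>
          first
          | (rw [PySem.List.pyRange_one, PySem.List.pyRange_one,
                show (y2 + 1 - y1).toNat = (x2 + 1 - x1).toNat from by omega,
                List.zip_map']
             refine congrArg some (map_range_congr _ _ _ _ (by omega)
               (fun k => by rw [Prod.mk.injEq]; constructor <;> ring)))
          | (rw [PySem.List.pyRange_one, PySem.List.pyRange_neg_one,
                show (y1 - (y2 + -1)).toNat = (x2 + 1 - x1).toNat from by omega,
                List.zip_map']
             refine congrArg some (map_range_congr _ _ _ _ (by omega)
               (fun k => by rw [Prod.mk.injEq]; constructor <;> ring)))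
          | (rw [PySem.List.pyRange_neg_one, PySem.List.pyRange_one,
                show (y2 + 1 - y1).toNat = (x1 - (x2 + -1)).toNat from by omega,
                List.zip_map']
             refine congrArg some (map_range_congr _ _ _ _ (by omega)
               (fun k => by rw [Prod.mk.injEq]; constructor <;> ring)))
          | (rw [PySem.List.pyRange_neg_one, PySem.List.pyRange_neg_one,
                show (y1 - (y2 + -1)).toNat = (x1 - (x2 + -1)).toNat from by omega,
                List.zip_map']
             refine congrArg some (map_range_congr _ _ _ _ (by omega)
               (fun k => by rw [Prod.mk.injEq]; constructor <;> ring)))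
      · rw [if_neg hd, if_pos hd]
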